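-- pv_equiv track=rewrite | github.com/giulianolol/ClasesPythonUTN | Clase 12/funciones.py | ejercicio7
-- ===== SOURCE A (Python) =====
-- def ejercicio7(cadena:str):
--
--     cadena = cadena.replace(",","")
--     lista = cadena.split()
--     lista_aux = []
--
--     for i in range(len(lista)):
--
--         lista_aux.append(lista[i].capitalize())
--
--     cadena_formateada = " ".join(lista_aux)
--
--     cadena_formateada = cadena_formateada.replace(" ",", ",1)
--
--     return cadena_formateada
-- ===== SOURCE B (Python) =====
-- def ejercicio7(cadena: str):
--     # single pass: a character-level state machine; no split/join/replace
--     out = []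
--     in_word = False
--     words_done = 0
--     for c in cadena:
--         if c == ',':
--             continue
--         if c.isspace():
--             in_word = False
--             continue
--         if not in_word:
--             if words_done == 1:
--                 out.append(', ')
--             elif words_done >= 2:
--                 out.append(' ')
--             words_done += 1
--             out.append(c.upper())
--             in_word = True
--         else:
--             out.append(c.lower())
--     return ''.join(out)
-- ===== Notes on version B (the rewrite author's own statement) =====
-- stated objective: alternative
-- what changed: B replaces A's staged pipeline (strip commas, split into a word list, capitalize in an index loop, join with spaces, patch the first space via count-limited replace) with a single character-level state machine that emits the output directly in one pass, tracking whether it is inside a word and how many words have started to choose the separator.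
import Mathlib
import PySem

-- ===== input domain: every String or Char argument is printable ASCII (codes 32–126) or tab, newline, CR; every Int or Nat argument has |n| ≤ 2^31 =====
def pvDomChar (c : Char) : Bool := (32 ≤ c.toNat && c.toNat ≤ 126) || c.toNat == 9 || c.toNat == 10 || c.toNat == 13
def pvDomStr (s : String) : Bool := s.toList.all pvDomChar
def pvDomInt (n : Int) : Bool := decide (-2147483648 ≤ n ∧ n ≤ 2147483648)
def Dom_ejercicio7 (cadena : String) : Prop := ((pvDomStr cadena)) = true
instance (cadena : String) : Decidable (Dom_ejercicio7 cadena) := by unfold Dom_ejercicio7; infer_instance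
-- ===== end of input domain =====

-- B replaces A's strip/split/capitalize-loop/join/patch-first-space pipeline by a single
-- character-level state machine that emits the result in one pass (alternative decomposition).

-- ===== PORT A =====
-- str.capitalize(): first char upper-cased, rest lower-cased (exact on the ASCII domain)
def pyCapitalize : List Char → List Char
  | [] => []
  | c :: rest => PySem.Chars.upperChar c :: PySem.Chars.lower rest

-- s.replace(" ", ", ", 1): hand port (PySem has no count-limited replace); exact for the
-- single-character pattern " " — replace the first space, leave the rest unchanged
def replaceFirstSpace : List Char → List Char
  | [] => []
  | c :: rest => if c = ' ' then ',' :: ' ' :: rest else c :: replaceFirstSpace rest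

def ejercicio7 (cadena : String) : String :=
  let cadena1 := PySem.Chars.replace cadena.toList [','] []
  let lista := PySem.Chars.split₀ cadena1
  let lista_aux := (PySem.List.pyRange 0 (PySem.List.len lista)).foldl
      (fun acc i => acc ++ [pyCapitalize (PySem.List.pyGetD lista i [])]) []
  let cadena_formateada := PySem.Chars.join [' '] lista_aux
  String.ofList (replaceFirstSpace cadena_formateada)

-- ===== PORT B =====
-- the separator appended before a word start, given how many words were already started
def bSep (n : Int) : List Char := if n == 1 then [',', ' '] else if 2 ≤ n then [' '] else []

-- one loop iteration of Source B: state = (out, in_word, words_done)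
def bStep (st : List Char × Bool × Int) (c : Char) : List Char × Bool × Int :=
  if c = ',' then st
  else if PySem.Chars.isspace c then (st.1, false, st.2.2)
  else if st.2.1 = false then
    (st.1 ++ bSep st.2.2 ++ [PySem.Chars.upperChar c], true, st.2.2 + 1)
  else (st.1 ++ [PySem.Chars.lowerChar c], true, st.2.2)

def ejercicio7_alt (cadena : String) : String :=
  String.ofList (cadena.toList.foldl bStep ([], false, 0)).1

-- ===== PRECONDITION & SPEC =====
def Spec_ejercicio7 (cadena : String) (out : String) : Prop := out = ejercicio7_alt cadena
instance (cadena : String) (out : String) : Decidable (Spec_ejercicio7 cadena out) := by unfold Spec_ejercicio7; infer_instance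

-- ===== CLAIM =====
def Claim_equal_ejercicio7 : Prop := ∀ (cadena : String), Dom_ejercicio7 cadena → Spec_ejercicio7 cadena (ejercicio7 cadena)

-- ===== LEMMAS AND PROOFS =====

-- the rendering both programs compute: each word preceded by the separator owed to its position
def emitW : Int → List (List Char) → List Char
  | _, [] => []
  | n, w :: r => bSep n ++ w ++ emitW (n + 1) r

def notSpace (c : Char) : Bool := !PySem.Chars.isspace c

-- ---- replace(",", "") is a filter ----
theorem replace_go_comma (fuel : Nat) : ∀ (l acc : List Char), l.length ≤ fuel →
    PySem.Chars.replace.go [','] [] fuel l acc = acc.reverse ++ l.filter (fun c => c ≠ ',') := by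
  induction fuel with
  | zero => intro l acc h; cases l with
    | nil => simp [PySem.Chars.replace.go]
    | cons c t => simp at h
  | succ fuel ih =>
    intro l acc h
    cases l with
    | nil => simp [PySem.Chars.replace.go]
    | cons c t =>
      simp only [PySem.Chars.replace.go]
      by_cases hc : c = ','
      · subst hc
        rw [if_pos (by simp [List.isPrefixOf])]
        rw [ih _ _ (by simpa using Nat.le_of_succ_le_succ h)]
        simp
      · rw [if_neg (by simp [List.isPrefixOf]; exact fun he => hc he.symm)]
        rw [ih _ _ (by simpa using Nat.le_of_succ_le_succ h)]
        simp [hc]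

theorem replace_comma (s : List Char) :
    PySem.Chars.replace s [','] [] = s.filter (fun c => c ≠ ',') := by
  unfold PySem.Chars.replace
  rw [if_neg (by simp)]
  simpa using replace_go_comma s.length s [] le_rfl

-- ---- the B scan ignores commas ----
theorem foldl_bStep_filter (s : List Char) : ∀ st : List Char × Bool × Int,
    s.foldl bStep st = (s.filter (fun c => c ≠ ',')).foldl bStep st := by
  induction s with
  | nil => intro st; rfl
  | cons c t ih =>
    intro st
    by_cases hc : c = ','
    · subst hc
      simp only [List.foldl_cons, List.filter_cons, decide_eq_true_eq]
      rw [if_neg (by simp)]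
      have : bStep st ',' = st := by simp [bStep]
      rw [this, ih]
    · simp only [List.foldl_cons, List.filter_cons]
      rw [if_pos (by simp [hc])]
      simp only [List.foldl_cons]
      rw [ih]

-- ---- structure of split() ----
theorem split₀_go_acc (s : List Char) : ∀ cur acc,
    PySem.Chars.split₀.go s cur acc = acc.reverse ++ PySem.Chars.split₀.go s cur [] := by
  induction s with
  | nil =>
    intro cur acc
    simp only [PySem.Chars.split₀.go]
    split_ifs <;> simp
  | cons c t ih =>
    intro cur acc
    simp only [PySem.Chars.split₀.go]
    split_ifs with hs hc
    · rw [ih [] acc]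
    · rw [ih [] (cur.reverse :: acc), ih [] [cur.reverse]]
      simp
    · rw [ih (c :: cur) acc]

theorem split₀_cons_space (c : Char) (s : List Char) (hs : PySem.Chars.isspace c = true) :
    PySem.Chars.split₀ (c :: s) = PySem.Chars.split₀ s := by
  simp [PySem.Chars.split₀, PySem.Chars.split₀.go, hs]

theorem split₀_go_inword (s : List Char) : ∀ cur, cur ≠ [] →
    PySem.Chars.split₀.go s cur [] =
      (cur.reverse ++ s.takeWhile notSpace) :: PySem.Chars.split₀ (s.dropWhile notSpace) := by
  induction s with
  | nil =>
    intro cur hcur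
    simp [PySem.Chars.split₀.go, PySem.Chars.split₀, List.isEmpty_iff, hcur]
  | cons c t ih =>
    intro cur hcur
    simp only [PySem.Chars.split₀.go]
    by_cases hs : PySem.Chars.isspace c = true
    · rw [if_pos hs, if_neg (by simpa [List.isEmpty_iff] using hcur)]
      rw [split₀_go_acc t [] [cur.reverse]]
      have ht : notSpace c = false := by simp [notSpace, hs]
      simp only [List.takeWhile_cons, List.dropWhile_cons, ht, Bool.false_eq_true, if_false,
        List.reverse_cons, List.reverse_nil, List.nil_append, List.append_nil, List.cons_append]
      rw [split₀_cons_space c t hs]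
      rfl
    · rw [if_neg hs, ih (c :: cur) (by simp)]
      have ht : notSpace c = true := by simp [notSpace, hs]
      simp [ht]

theorem split₀_cons_word (c : Char) (s : List Char) (hs : PySem.Chars.isspace c = false) :
    PySem.Chars.split₀ (c :: s) =
      (c :: s.takeWhile notSpace) :: PySem.Chars.split₀ (s.dropWhile notSpace) := by
  have : PySem.Chars.split₀ (c :: s) = PySem.Chars.split₀.go s [c] [] := by
    simp [PySem.Chars.split₀, PySem.Chars.split₀.go, hs]
  rw [this, split₀_go_inword s [c] (by simp)]
  simp

-- ---- the scan computes emitW over the capitalized words ----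
theorem scan_spec (s : List Char) (hcf : ∀ c ∈ s, c ≠ ',') :
    (∀ out n, (s.foldl bStep (out, false, n)).1
        = out ++ emitW n ((PySem.Chars.split₀ s).map pyCapitalize))
    ∧ (∀ out n, (s.foldl bStep (out, true, n)).1
        = out ++ PySem.Chars.lower (s.takeWhile notSpace)
              ++ emitW n ((PySem.Chars.split₀ (s.dropWhile notSpace)).map pyCapitalize)) := by
  induction s with
  | nil =>
    refine ⟨fun out n => ?_, fun out n => ?_⟩ <;>
      simp [PySem.Chars.split₀, PySem.Chars.split₀.go, emitW, PySem.Chars.lower]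
  | cons c t ih =>
    have hc : c ≠ ',' := hcf c (by simp)
    have hcf' : ∀ d ∈ t, d ≠ ',' := fun d hd => hcf d (by simp [hd])
    obtain ⟨ihF, ihT⟩ := ih hcf'
    by_cases hs : PySem.Chars.isspace c = true
    · have hstep : ∀ (out : List Char) (b : Bool) (n : Int),
          bStep (out, b, n) c = (out, false, n) := by
        intro out b n; simp [bStep, hc, hs]
      refine ⟨fun out n => ?_, fun out n => ?_⟩ <;>
        simp only [List.foldl_cons, hstep]
      · rw [ihF, split₀_cons_space c t hs]
      · have ht : notSpace c = false := by simp [notSpace, hs]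
        rw [ihF]
        simp [ht, split₀_cons_space c t hs, PySem.Chars.lower]
    · have hs' : PySem.Chars.isspace c = false := by simpa using hs
      have ht : notSpace c = true := by simp [notSpace, hs']
      constructor
      · intro out n
        have hstep : bStep (out, false, n) c
            = (out ++ bSep n ++ [PySem.Chars.upperChar c], true, n + 1) := by
          simp [bStep, hc, hs']
        simp only [List.foldl_cons, hstep]
        rw [ihT, split₀_cons_word c t hs']
        simp [emitW, pyCapitalize, PySem.Chars.lower]
      · intro out n
        have hstep : bStep (out, true, n) c
            = (out ++ [PySem.Chars.lowerChar c], true, n) := by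
          simp [bStep, hc, hs']
        simp only [List.foldl_cons, hstep]
        rw [ihT]
        simp [ht, PySem.Chars.lower]

-- ---- A-side: join-then-patch equals emitW ----
theorem upperChar_ne_space (c : Char) (h : PySem.Chars.isspace c = false) :
    PySem.Chars.upperChar c ≠ ' ' := by
  unfold PySem.Chars.upperChar PySem.Chars.islower
  simp only [PySem.Chars.isspace, Bool.or_eq_false_iff, decide_eq_false_iff_not,
    Bool.and_eq_false_iff] at h
  split_ifs with hl
  · simp only [decide_eq_true_iff, Char.le_def, UInt32.le_iff_toNat_le,
      Bool.and_eq_true] at hl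
    have h97 : 97 ≤ c.toNat := hl.1
    have h122 : c.toNat ≤ 122 := hl.2
    intro he
    have hv : (c.toNat - 32).isValidChar := Or.inl (by omega)
    have h2 := congrArg Char.toNat he
    rw [Char.toNat_ofNat, if_pos hv] at h2
    have : (' ' : Char).toNat = 32 := rfl
    omega
  · intro he
    have : c.toNat = 32 := by rw [he]; decide
    tauto

theorem lowerChar_ne_space (c : Char) (h : PySem.Chars.isspace c = false) :
    PySem.Chars.lowerChar c ≠ ' ' := by
  unfold PySem.Chars.lowerChar PySem.Chars.isupper
  simp only [PySem.Chars.isspace, Bool.or_eq_false_iff, decide_eq_false_iff_not,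
    Bool.and_eq_false_iff] at h
  split_ifs with hl
  · simp only [decide_eq_true_iff, Char.le_def, UInt32.le_iff_toNat_le,
      Bool.and_eq_true] at hl
    have h65 : 65 ≤ c.toNat := hl.1
    have h90 : c.toNat ≤ 90 := hl.2
    intro he
    have hv : (c.toNat + 32).isValidChar := Or.inl (by omega)
    have h2 := congrArg Char.toNat he
    rw [Char.toNat_ofNat, if_pos hv] at h2
    have : (' ' : Char).toNat = 32 := rfl
    omega
  · intro he
    have : c.toNat = 32 := by rw [he]; decide
    tauto

-- every word produced by split() is nonempty and contains no whitespace character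
theorem split₀_go_words (s cur acc : _) (hcur : ∀ c ∈ cur, PySem.Chars.isspace c = false)
    (hacc : ∀ w ∈ acc, w ≠ [] ∧ ∀ c ∈ w, PySem.Chars.isspace c = false) :
    ∀ w ∈ PySem.Chars.split₀.go s cur acc, w ≠ [] ∧ ∀ c ∈ w, PySem.Chars.isspace c = false := by
  induction s generalizing cur acc with
  | nil =>
    intro w hw
    simp only [PySem.Chars.split₀.go] at hw
    split_ifs at hw with hc
    · exact hacc w (by simpa using hw)
    · rw [List.mem_reverse] at hw
      rcases List.mem_cons.mp hw with hw | hw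
      · subst hw
        refine ⟨by simpa [List.isEmpty_iff] using hc, ?_⟩
        intro c hc'
        exact hcur c (List.mem_reverse.mp hc')
      · exact hacc w hw
  | cons c rest ih =>
    intro w hw
    simp only [PySem.Chars.split₀.go] at hw
    split_ifs at hw with hs hc
    · exact ih [] acc (by simp) hacc w hw
    · refine ih [] (cur.reverse :: acc) (by simp) ?_ w hw
      intro v hv
      rcases List.mem_cons.mp hv with hv | hv
      · subst hv
        refine ⟨by simpa [List.isEmpty_iff] using hc, ?_⟩
        intro d hd
        exact hcur d (List.mem_reverse.mp hd)
      · exact hacc v hv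
    · refine ih (c :: cur) acc ?_ hacc w hw
      intro d hd
      rcases List.mem_cons.mp hd with hd | hd
      · subst hd; simpa using hs
      · exact hcur d hd

theorem split₀_words (s : List Char) :
    ∀ w ∈ PySem.Chars.split₀ s, w ≠ [] ∧ ∀ c ∈ w, PySem.Chars.isspace c = false := by
  exact split₀_go_words s [] [] (by simp) (by simp)

theorem pyCapitalize_good (w : List Char) (hne : w ≠ [])
    (hs : ∀ c ∈ w, PySem.Chars.isspace c = false) :
    pyCapitalize w ≠ [] ∧ ∀ c ∈ pyCapitalize w, c ≠ ' ' := by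
  cases w with
  | nil => exact absurd rfl hne
  | cons c rest =>
    refine ⟨by simp [pyCapitalize], ?_⟩
    intro d hd
    simp only [pyCapitalize, PySem.Chars.lower, List.mem_cons, List.mem_map] at hd
    rcases hd with hd | ⟨e, he, hd⟩
    · subst hd; exact upperChar_ne_space c (hs c (by simp))
    · subst hd; exact lowerChar_ne_space e (hs e (by simp [he]))

theorem rfs_nospace (w : List Char) (hw : ∀ c ∈ w, c ≠ ' ') :
    replaceFirstSpace w = w := by
  induction w with
  | nil => rfl
  | cons c rest ih =>
    simp only [replaceFirstSpace]
    rw [if_neg (hw c (by simp)), ih (fun d hd => hw d (by simp [hd]))]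

theorem rfs_append (w t : List Char) (hw : ∀ c ∈ w, c ≠ ' ') :
    replaceFirstSpace (w ++ ' ' :: t) = w ++ ',' :: ' ' :: t := by
  induction w with
  | nil => simp [replaceFirstSpace]
  | cons c rest ih =>
    simp only [List.cons_append, replaceFirstSpace]
    rw [if_neg (hw c (by simp)), ih (fun d hd => hw d (by simp [hd]))]

theorem foldl_append_capitalize (xs : List (List Char)) (init : List (List Char)) :
    xs.foldl (fun acc w => acc ++ [pyCapitalize w]) init = init ++ xs.map pyCapitalize := by
  induction xs generalizing init with
  | nil => simp
  | cons x xs ih => simp [List.foldl_cons, ih]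

theorem emitW_ge_two (r : List (List Char)) : ∀ n : Int, 2 ≤ n →
    emitW n r = r.flatMap (fun x => ' ' :: x) := by
  induction r with
  | nil => intro n _; rfl
  | cons x r ih =>
    intro n hn
    have hsep : bSep n = [' '] := by
      unfold bSep
      rw [if_neg (by simp; omega), if_pos hn]
    simp [emitW, hsep, ih (n + 1) (by omega)]

theorem join_space (r : List (List Char)) : ∀ v,
    PySem.Chars.join [' '] (v :: r) = v ++ r.flatMap (fun x => ' ' :: x) := by
  induction r with
  | nil => intro v; simp [PySem.Chars.join_singleton]
  | cons b r ih =>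
    intro v
    rw [PySem.Chars.join_cons_cons, ih b]
    simp

-- A's result in emitW form
theorem ejercicio7_eq_emit (cadena : String) :
    ejercicio7 cadena
      = String.ofList (emitW 0
          ((PySem.Chars.split₀ (PySem.Chars.replace cadena.toList [','] [])).map pyCapitalize)) := by
  unfold ejercicio7
  have hfold :
      (PySem.List.pyRange 0 (PySem.List.len (PySem.Chars.split₀ (PySem.Chars.replace cadena.toList [','] [])))).foldl
        (fun acc i => acc ++ [pyCapitalize (PySem.List.pyGetD (PySem.Chars.split₀ (PySem.Chars.replace cadena.toList [','] [])) i [])]) []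
      = (PySem.Chars.split₀ (PySem.Chars.replace cadena.toList [','] [])).map pyCapitalize := by
    rw [PySem.List.foldl_pyRange_pyGetD _ _ (fun acc w => acc ++ [pyCapitalize w]) [] le_rfl]
    rw [Int.toNat_zero, List.drop_zero, foldl_append_capitalize, List.nil_append]
  simp only [hfold]
  have hwords := split₀_words (PySem.Chars.replace cadena.toList [','] [])
  cases hsp : PySem.Chars.split₀ (PySem.Chars.replace cadena.toList [','] []) with
  | nil => simp [PySem.Chars.join_nil, replaceFirstSpace, emitW]
  | cons w rest =>
    rw [hsp] at hwords
    have hw := pyCapitalize_good w (hwords w (by simp)).1 (hwords w (by simp)).2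
    cases rest with
    | nil =>
      simp only [List.map_cons, List.map_nil, PySem.Chars.join_singleton]
      rw [rfs_nospace _ hw.2]
      simp [emitW, bSep]
    | cons v r =>
      simp only [List.map_cons]
      rw [join_space (pyCapitalize v :: r.map pyCapitalize) (pyCapitalize w)]
      simp only [List.flatMap_cons, List.cons_append]
      rw [rfs_append _ _ hw.2]
      simp only [emitW]
      rw [emitW_ge_two (r.map pyCapitalize) (0 + 1 + 1) (by norm_num)]
      simp [bSep]
-- ===== VERDICT =====
theorem ejercicio7_spec : Claim_equal_ejercicio7 := by
  intro cadena _
  unfold Spec_ejercicio7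
  rw [ejercicio7_eq_emit]
  unfold ejercicio7_alt
  rw [foldl_bStep_filter cadena.toList ([], false, 0)]
  have hcf : ∀ c ∈ cadena.toList.filter (fun c => c ≠ ','), c ≠ ',' := by
    intro c hcmem
    have := List.of_mem_filter hcmem
    simpa using this
  rw [(scan_spec _ hcf).1 [] 0]
  rw [replace_comma]
  simp
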